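-- pv_equiv track=rewrite | github.com/Rw-jpEG/FIT2004-RW | applied7.py | ferry_cars
-- ===== SOURCE A (Python) =====
-- def ferry_cars(L, cars):
--     n = len(cars)
--     sum = [0]*(n+1)
--     for i in range(1, n+1):
--         sum[i] = sum[i-1] + cars[i-1]
--
--     memo = [set() for _ in range(n+1)]
--     memo[0].add(0)
--
--     max_cars = 0
--
--     for i in range(n):
--         for left_len in memo[i]:
--             right_len = sum[i] - left_len
--
--             if left_len + cars[i] <= L:
--                 memo[i+1].add(left_len + cars[i])
--                 max_cars = max(max_cars, i+1)
--
--             if right_len + cars[i] <= L: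
--                 memo[i+1].add(left_len)
--                 max_cars = max(max_cars, i+1)
--
--     return max_cars
-- ===== SOURCE B (Python) =====
-- def ferry_cars(L, cars):
--     # Depth-first search over the state graph of partial placements:
--     # a state (i, left) means cars[:i] are placed with `left` total in the left
--     # lane (the right lane then holds prefix_sum(i) - left).  The answer is the
--     # greatest depth i of any reachable state.  Explicit stack, one global
--     # visited set; no per-level frontier sets and no prefix-sum array.
--     n = len(cars)
--     stack = [(0, 0, 0)]
--     visited = {(0, 0)}
--     ans = 0
--     while stack:
--         i, left, total = stack.pop()
--         if i > ans:
--             ans = i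
--         if i == n:
--             continue
--         c = cars[i]
--         if left + c <= L and (i + 1, left + c) not in visited:
--             visited.add((i + 1, left + c))
--             stack.append((i + 1, left + c, total + c))
--         if total + c - left <= L and (i + 1, left) not in visited:
--             visited.add((i + 1, left))
--             stack.append((i + 1, left, total + c))
--     return ans
-- ===== Notes on version B (the rewrite author's own statement) =====
-- stated objective: alternative
-- what changed: B replaces A's level-synchronous dynamic programming (an array of n+1 per-level sets of feasible left-lane loads plus a prefix-sum array and a running max) with an explicit-stack depth-first search over the graph of placement states (i, left_load) using one global visited set, returning the greatest depth of any reachable state.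
import Mathlib
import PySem

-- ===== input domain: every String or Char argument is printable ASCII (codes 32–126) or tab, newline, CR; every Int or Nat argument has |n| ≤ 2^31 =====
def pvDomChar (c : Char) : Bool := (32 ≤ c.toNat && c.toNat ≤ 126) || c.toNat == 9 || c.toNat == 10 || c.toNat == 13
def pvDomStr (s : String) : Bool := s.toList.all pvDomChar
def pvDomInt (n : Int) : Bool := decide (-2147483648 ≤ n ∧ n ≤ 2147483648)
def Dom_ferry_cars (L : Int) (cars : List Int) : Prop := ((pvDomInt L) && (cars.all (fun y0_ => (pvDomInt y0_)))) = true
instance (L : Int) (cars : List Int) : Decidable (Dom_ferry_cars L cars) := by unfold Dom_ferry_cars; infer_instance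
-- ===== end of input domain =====

-- B replaces A's level-synchronous set DP (array of n+1 per-level sets, prefix-sum
-- array, running max) with an explicit-stack depth-first search over placement
-- states (i, left_load) using one global visited set; alternative, not faster.

-- ===== PORT A =====
-- sum[i] = sum[i-1] + cars[i-1] for i in range(1, n+1); all indices are in range,
-- so List.set / List.getD are exact renderings of the list writes/reads.
def ferrySums (cars : List Int) : Nat → Nat → List Int → List Int
  | _, 0, s => s
  | i, rem+1, s => ferrySums cars (i+1) rem (s.set i (s.getD (i-1) 0 + cars.getD (i-1) 0))

-- body of 'for left_len in memo[i]': the two 'if's, mutating memo[i+1] and max_cars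
def ferryInner (L c si : Int) (i : Nat) (st : List (PySem.Set Int) × Int) (l : Int) :
    List (PySem.Set Int) × Int :=
  let right := si - l
  let st1 := if l + c ≤ L then
      (st.1.set (i+1) (PySem.Set.add (st.1.getD (i+1) []) (l + c)), max st.2 ((i : Int) + 1))
    else st
  if right + c ≤ L then
    (st1.1.set (i+1) (PySem.Set.add (st1.1.getD (i+1) []) l), max st1.2 ((i : Int) + 1))
  else st1

-- 'for i in range(n)' with state (memo, max_cars); rem = n - i
def ferryOuter (L : Int) (cars sums : List Int) : Nat → Nat → List (PySem.Set Int) → Int → Int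
  | _, 0, _, mx => mx
  | i, rem+1, memo, mx =>
    let st := (memo.getD i []).foldl (ferryInner L (cars.getD i 0) (sums.getD i 0) i) (memo, mx)
    ferryOuter L cars sums (i+1) rem st.1 st.2

def ferry_cars (L : Int) (cars : List Int) : Int :=
  let n := cars.length
  let sums := ferrySums cars 1 n (List.replicate (n+1) 0)
  let memo := (List.replicate (n+1) (PySem.Set.empty : PySem.Set Int)).set 0
                (PySem.Set.add PySem.Set.empty 0)
  ferryOuter L cars sums 0 n memo 0

-- ===== PORT B =====
-- 'while stack: pop (i, left, total); update ans; conditionally push the two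
-- children, each guarded by its fit test and a visited-set check (the second
-- check sees the first push, as in Python)'.  The fuel argument only makes the
-- while-loop total; 2^(n+2) is proved sufficient below (dfs_good/b_good).
def ferryDfs (L : Int) (cars : List Int) (n : Nat) :
    Nat → List (Nat × Int × Int) → PySem.Set (Nat × Int) → Int → Int
  | _, [], _, ans => ans
  | 0, _ :: _, _, ans => ans
  | fuel+1, (i, l, t) :: stack, visited, ans =>
    let ans' := if (i : Int) > ans then (i : Int) else ans
    if i = n then ferryDfs L cars n fuel stack visited ans'
    else
      let c := cars.getD i 0
      let s1 := if l + c ≤ L ∧ (i+1, l+c) ∉ visited then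
          ((i+1, l+c, t+c) :: stack, PySem.Set.add visited (i+1, l+c)) else (stack, visited)
      let s2 := if t + c - l ≤ L ∧ (i+1, l) ∉ s1.2 then
          ((i+1, l, t+c) :: s1.1, PySem.Set.add s1.2 (i+1, l)) else s1
      ferryDfs L cars n fuel s2.1 s2.2 ans'

def ferry_cars_alt (L : Int) (cars : List Int) : Int :=
  ferryDfs L cars cars.length (2 ^ (cars.length + 2)) [(0, 0, 0)]
    (PySem.Set.ofList [((0 : Nat), (0 : Int))]) 0

-- ===== PRECONDITION & SPEC =====
def Spec_ferry_cars (L : Int) (cars : List Int) (out : Int) : Prop := out = ferry_cars_alt L cars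
instance (L : Int) (cars : List Int) (out : Int) : Decidable (Spec_ferry_cars L cars out) := by unfold Spec_ferry_cars; infer_instance

-- ===== CLAIM (what is proved, stated in full; the proofs are below) =====
def Claim_equal_ferry_cars : Prop := ∀ (L : Int) (cars : List Int), Dom_ferry_cars L cars → Spec_ferry_cars L cars (ferry_cars L cars)

-- ===== LEMMAS AND PROOFS =====

-- The frontier loop A's computation is first reduced to (one evolving set of
-- feasible left-lane loads, stopping at the first empty frontier).
def ferryAltLoop (L : Int) : Nat → Int → PySem.Set Int → List Int → Int
  | k, _, _, [] => (k : Int)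
  | k, total, loads, c :: rest =>
    let total' := total + c
    let loads' := PySem.Set.union
      (PySem.Set.ofList ((loads.filter (fun l => decide (l + c ≤ L))).map (fun l => l + c)))
      (PySem.Set.ofList (loads.filter (fun l => decide (total' - l ≤ L))))
    if loads'.isEmpty then (k : Int) else ferryAltLoop L (k+1) total' loads' rest

-- A's inner loop acting only on (memo[i+1], max_cars)
def ferryG (L c si : Int) (i : Nat) (st : PySem.Set Int × Int) (l : Int) :
    PySem.Set Int × Int :=
  if si - l + c ≤ L then
    if l + c ≤ L then
      (PySem.Set.add (PySem.Set.add st.1 (l + c)) l, max (max st.2 ((i : Int) + 1)) ((i : Int) + 1))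
    else (PySem.Set.add st.1 l, max st.2 ((i : Int) + 1))
  else
    if l + c ≤ L then (PySem.Set.add st.1 (l + c), max st.2 ((i : Int) + 1)) else st

theorem ferry_set_getD (l : List (PySem.Set Int)) (i : Nat) (h : i < l.length) :
    l.set i (l.getD i []) = l := by
  apply List.ext_getElem (by simp)
  intro j hj _
  by_cases hij : j = i
  · subst hij; simp [List.getD_eq_getElem?_getD, List.getElem?_eq_getElem h]
  · rw [List.getElem_set_ne (by omega)]

theorem ferryInner_step (L c si : Int) (i : Nat) (memo : List (PySem.Set Int)) (mx l : Int)
    (h : i + 1 < memo.length) :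
    ferryInner L c si i (memo, mx) l =
      (memo.set (i+1) (ferryG L c si i (memo.getD (i+1) [], mx) l).1,
       (ferryG L c si i (memo.getD (i+1) [], mx) l).2) := by
  simp only [ferryInner, ferryG]
  split_ifs <;>
    simp [List.getD_eq_getElem?_getD, List.set_set, h]

theorem ferry_inner_eq (L c si : Int) (i : Nat) :
    ∀ (els : List Int) (memo : List (PySem.Set Int)) (mx : Int), i + 1 < memo.length →
      els.foldl (ferryInner L c si i) (memo, mx) =
        (memo.set (i+1) (els.foldl (ferryG L c si i) (memo.getD (i+1) [], mx)).1,
         (els.foldl (ferryG L c si i) (memo.getD (i+1) [], mx)).2) := by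
  intro els
  induction els with
  | nil =>
    intro memo mx h
    have h2 := ferry_set_getD memo (i+1) h
    rw [List.getD_eq_getElem?_getD] at h2
    simp [h2]
  | cons l rest ih =>
    intro memo mx h
    rw [List.foldl_cons, ferryInner_step L c si i memo mx l h, List.foldl_cons]
    rw [ih _ _ (by simpa using h)]
    have hg : (memo.set (i+1) (ferryG L c si i (memo.getD (i+1) [], mx) l).1).getD (i+1) []
        = (ferryG L c si i (memo.getD (i+1) [], mx) l).1 := by
      simp [List.getD_eq_getElem?_getD, h]
    rw [hg, List.set_set]

theorem ferryG_fst_mem (L c si : Int) (i : Nat) (st : PySem.Set Int × Int) (l x : Int) :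
    x ∈ (ferryG L c si i st l).1 ↔
      x ∈ st.1 ∨ ((l + c ≤ L ∧ x = l + c) ∨ (si - l + c ≤ L ∧ x = l)) := by
  unfold ferryG
  split_ifs <;> simp [PySem.Set.mem_add, *] <;> tauto

theorem ferryG_snd_step (L c si : Int) (i : Nat) (st : PySem.Set Int × Int) (l : Int) :
    (ferryG L c si i st l).2 =
      if l + c ≤ L ∨ si - l + c ≤ L then max st.2 ((i : Int) + 1) else st.2 := by
  unfold ferryG
  split_ifs <;> simp [*] <;> tauto

theorem ferryG_mem (L c si : Int) (i : Nat) :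
    ∀ (els : List Int) (st : PySem.Set Int × Int) (x : Int),
      x ∈ (els.foldl (ferryG L c si i) st).1 ↔
        x ∈ st.1 ∨ ∃ l ∈ els, (l + c ≤ L ∧ x = l + c) ∨ (si - l + c ≤ L ∧ x = l) := by
  intro els
  induction els with
  | nil => intro st x; simp
  | cons l rest ih =>
    intro st x
    rw [List.foldl_cons, ih, ferryG_fst_mem, List.exists_mem_cons_iff]
    exact or_assoc

theorem ferryG_snd (L c si : Int) (i : Nat) :
    ∀ (els : List Int) (st : PySem.Set Int × Int),
      (els.foldl (ferryG L c si i) st).2 =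
        if ∃ l ∈ els, l + c ≤ L ∨ si - l + c ≤ L then max st.2 ((i : Int) + 1) else st.2 := by
  intro els
  induction els with
  | nil => intro st; simp
  | cons l rest ih =>
    intro st
    rw [List.foldl_cons, ih, ferryG_snd_step]
    by_cases h1 : l + c ≤ L ∨ si - l + c ≤ L <;>
      by_cases h2 : ∃ l ∈ rest, l + c ≤ L ∨ si - l + c ≤ L <;>
      simp [h1, h2]

theorem ferry_alt_mem (L c t : Int) (loads : List Int) (x : Int) :
    (x ∈ PySem.Set.union
        (PySem.Set.ofList ((loads.filter (fun l => decide (l + c ≤ L))).map (fun l => l + c)))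
        (PySem.Set.ofList (loads.filter (fun l => decide (t - l ≤ L))))) ↔
      ∃ l ∈ loads, (l + c ≤ L ∧ x = l + c) ∨ (t - l ≤ L ∧ x = l) := by
  simp only [PySem.Set.mem_union, PySem.Set.mem_ofList, List.mem_map, List.mem_filter,
    decide_eq_true_eq]
  constructor
  · rintro (⟨l, ⟨hl, hc⟩, rfl⟩ | ⟨hl, hc⟩)
    · exact ⟨l, hl, Or.inl ⟨hc, rfl⟩⟩
    · exact ⟨x, hl, Or.inr ⟨hc, rfl⟩⟩
  · rintro ⟨l, hl, ⟨hc, rfl⟩ | ⟨hc, rfl⟩⟩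
    · exact Or.inl ⟨l, ⟨hl, hc⟩, rfl⟩
    · exact Or.inr ⟨hl, hc⟩

theorem ferry_dead (L : Int) (cars sums : List Int) :
    ∀ (rem i : Nat) (memo : List (PySem.Set Int)) (mx : Int),
      (∀ j, i ≤ j → memo.getD j [] = []) →
      ferryOuter L cars sums i rem memo mx = mx := by
  intro rem
  induction rem with
  | zero => intro i memo mx h; simp [ferryOuter]
  | succ rem ih =>
    intro i memo mx h
    simp only [ferryOuter, h i le_rfl, List.foldl_nil]
    exact ih (i+1) memo mx (fun j hj => h j (by omega))

theorem ferry_sums_spec (cars : List Int) :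
    ∀ (rem i : Nat) (s : List Int), 1 ≤ i → i + rem = cars.length + 1 →
      s.length = cars.length + 1 →
      (∀ j, j < i → s.getD j 0 = ((cars.take j).sum)) →
      (∀ j, j < i + rem → (ferrySums cars i rem s).getD j 0 = ((cars.take j).sum)) := by
  intro rem
  induction rem with
  | zero => intro i s h1 h2 h3 h4 j hj; simp only [ferrySums]; exact h4 j (by omega)
  | succ rem ih =>
    intro i s h1 h2 h3 h4 j hj
    obtain ⟨m, rfl⟩ : ∃ m, i = m + 1 := ⟨i - 1, by omega⟩
    simp only [ferrySums]
    have hmlt : m + 1 < s.length := by omega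
    have hmc : m < cars.length := by omega
    have h4' : ∀ j, j < m + 2 →
        (s.set (m+1) (s.getD (m+1-1) 0 + cars.getD (m+1-1) 0)).getD j 0 = (cars.take j).sum := by
      intro j hj2
      by_cases hje : j = m + 1
      · subst hje
        have : (s.set (m+1) (s.getD (m+1-1) 0 + cars.getD (m+1-1) 0)).getD (m+1) 0
            = s.getD m 0 + cars.getD m 0 := by
          simp [List.getD_eq_getElem?_getD, hmlt]
        rw [this, h4 m (by omega), List.getD_eq_getElem _ _ hmc,
            List.take_add_one, List.sum_append, List.getElem?_eq_getElem hmc]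
        simp
      · have : (s.set (m+1) (s.getD (m+1-1) 0 + cars.getD (m+1-1) 0)).getD j 0 = s.getD j 0 := by
          simp [List.getD_eq_getElem?_getD, List.getElem?_set_ne (by omega : ¬ (m+1) = j)]
        rw [this]; exact h4 j (by omega)
    exact ih (m+2) _ (by omega) (by omega) (by simpa using h3) h4' j (by omega)

theorem ferry_main (L : Int) (cars sums : List Int)
    (hs : ∀ j, j ≤ cars.length → sums.getD j 0 = (cars.take j).sum) :
    ∀ (rem i : Nat) (memo : List (PySem.Set Int)) (mx total : Int) (loads : PySem.Set Int),
      i + rem = cars.length → memo.length = cars.length + 1 →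
      (∀ x : Int, x ∈ memo.getD i [] ↔ x ∈ loads) → loads ≠ [] →
      (∀ j, i < j → memo.getD j [] = []) →
      mx = (i : Int) → total = (cars.take i).sum →
      ferryOuter L cars sums i rem memo mx = ferryAltLoop L i total loads (cars.drop i) := by
  intro rem
  induction rem with
  | zero =>
    intro i memo mx total loads h1 h2 h3 h4 h5 h6 h7
    have : i = cars.length := by omega
    subst this
    simp [ferryOuter, ferryAltLoop, List.drop_length, h6]
  | succ rem ih =>
    intro i memo mx total loads h1 h2 h3 h4 h5 h6 h7
    have hilt : i < cars.length := by omega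
    have hi1 : i + 1 < memo.length := by omega
    have hcg : cars.getD i 0 = cars[i] := List.getD_eq_getElem cars 0 hilt
    have hdrop : cars.drop i = cars[i] :: cars.drop (i+1) := (List.getElem_cons_drop hilt).symm
    have hsit : sums.getD i 0 = total := by rw [hs i (by omega), h7]
    -- peel one outer iteration of A
    simp only [ferryOuter]
    rw [ferry_inner_eq L (cars.getD i 0) (sums.getD i 0) i (memo.getD i []) memo mx hi1,
        h5 (i+1) (by omega)]
    -- peel one step of the frontier loop
    rw [hdrop]
    simp only [ferryAltLoop]
    -- names
    set c := cars[i] with hc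
    rw [hcg]
    set els := memo.getD i [] with hels
    set W := (els.foldl (ferryG L c (sums.getD i 0) i) (([] : PySem.Set Int), mx)).1 with hWdef
    set loadsB := PySem.Set.union
        (PySem.Set.ofList ((loads.filter (fun l => decide (l + c ≤ L))).map (fun l => l + c)))
        (PySem.Set.ofList (loads.filter (fun l => decide (total + c - l ≤ L)))) with hloadsB
    have hmemW : ∀ x : Int, x ∈ W ↔
        ∃ l ∈ els, (l + c ≤ L ∧ x = l + c) ∨ (sums.getD i 0 - l + c ≤ L ∧ x = l) := by
      intro x; rw [hWdef, ferryG_mem]; simp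
    have hiff : ∀ x : Int, x ∈ W ↔ x ∈ loadsB := by
      intro x
      rw [hmemW, hloadsB, ferry_alt_mem]
      exact exists_congr fun l => and_congr (h3 l) (or_congr Iff.rfl
        (and_congr_left fun _ => by rw [hsit]; omega))
    have hsucc_iff : (∃ l ∈ els, l + c ≤ L ∨ sums.getD i 0 - l + c ≤ L) ↔ W ≠ [] := by
      constructor
      · rintro ⟨l, hl, hcase | hcase⟩
        · exact List.ne_nil_of_mem ((hmemW _).mpr ⟨l, hl, Or.inl ⟨hcase, rfl⟩⟩)
        · exact List.ne_nil_of_mem ((hmemW _).mpr ⟨l, hl, Or.inr ⟨hcase, rfl⟩⟩)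
      · intro hne
        obtain ⟨x, hx⟩ := List.exists_mem_of_ne_nil W hne
        obtain ⟨l, hl, hcase⟩ := (hmemW x).mp hx
        exact ⟨l, hl, by tauto⟩
    have hsnd := ferryG_snd L c (sums.getD i 0) i els (([] : PySem.Set Int), mx)
    by_cases hB : loadsB.isEmpty
    · -- the frontier dies here; A's memo[i+1] is empty and the rest of the loop is dead
      have hBnil : loadsB = [] := List.isEmpty_iff.mp hB
      have hWnil : W = [] := by
        apply List.eq_nil_iff_forall_not_mem.mpr
        intro x hx
        exact (List.not_mem_nil (a := x)).elim (hBnil ▸ (hiff x).mp hx)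
      have hnosucc : ¬ ∃ l ∈ els, l + c ≤ L ∨ sums.getD i 0 - l + c ≤ L := by
        rw [hsucc_iff]; simp [hWnil]
      rw [if_pos hB]
      have hsnd' : (els.foldl (ferryG L c (sums.getD i 0) i) (([] : PySem.Set Int), mx)).2 = mx := by
        rw [hsnd, if_neg hnosucc]
      rw [hsnd']
      rw [ferry_dead L cars sums rem (i+1) _ mx ?_]
      · exact h6
      · intro j hj
        by_cases hji : j = i + 1
        · subst hji
          simp [List.getD_eq_getElem?_getD, hi1, hWnil]
        · rw [show (memo.set (i+1) W).getD j [] = memo.getD j [] by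
            simp [List.getD_eq_getElem?_getD, List.getElem?_set_ne (by omega : ¬ (i+1) = j)]]
          exact h5 j (by omega)
    · -- both continue
      have hBne : loadsB ≠ [] := by
        intro hnil; rw [hnil] at hB; simp at hB
      have hWne : W ≠ [] := by
        intro hnil
        apply hBne
        apply List.eq_nil_iff_forall_not_mem.mpr
        intro x hx
        exact (List.not_mem_nil (a := x)).elim (hnil ▸ (hiff x).mpr hx)
      have hsucc : ∃ l ∈ els, l + c ≤ L ∨ sums.getD i 0 - l + c ≤ L := hsucc_iff.mpr hWne
      have hsnd' : (els.foldl (ferryG L c (sums.getD i 0) i) (([] : PySem.Set Int), mx)).2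
          = (i : Int) + 1 := by
        rw [hsnd, if_pos hsucc, h6]
        exact max_eq_right (by omega)
      rw [if_neg hB, hsnd']
      have hgetW : (memo.set (i+1) W).getD (i+1) [] = W := by
        simp [List.getD_eq_getElem?_getD, hi1]
      have htake : total + c = (cars.take (i+1)).sum := by
        rw [h7, hc, List.take_add_one, List.sum_append, List.getElem?_eq_getElem hilt]
        simp
      have := ih (i+1) (memo.set (i+1) W) ((i : Int) + 1) (total + c) loadsB
        (by omega) (by simpa using h2)
        (by intro x; rw [hgetW]; exact hiff x) hBne
        (by
          intro j hj
          rw [show (memo.set (i+1) W).getD j [] = memo.getD j [] by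
            simp [List.getD_eq_getElem?_getD, List.getElem?_set_ne (by omega : ¬ (i+1) = j)]]
          exact h5 j (by omega))
        (by push_cast; ring) htake
      rw [this]

theorem ferry_eq_altLoop (L : Int) (cars : List Int) :
    ferry_cars L cars = ferryAltLoop L 0 0 (PySem.Set.ofList [0]) cars := by
  unfold ferry_cars
  simp only []
  have hs : ∀ j, j ≤ cars.length →
      (ferrySums cars 1 cars.length (List.replicate (cars.length+1) 0)).getD j 0
        = (cars.take j).sum := by
    intro j hj
    refine ferry_sums_spec cars cars.length 1 _ (by omega) (by omega) (by simp) ?_ j (by omega)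
    intro j2 hj2
    interval_cases j2
    simp
  have hmemo0 : ((List.replicate (cars.length+1) (PySem.Set.empty : PySem.Set Int)).set 0
      (PySem.Set.add PySem.Set.empty 0)).getD 0 [] = PySem.Set.add PySem.Set.empty 0 := by
    simp [List.getD_eq_getElem?_getD]
  have := ferry_main L cars
    (ferrySums cars 1 cars.length (List.replicate (cars.length+1) 0)) hs
    cars.length 0
    ((List.replicate (cars.length+1) (PySem.Set.empty : PySem.Set Int)).set 0
      (PySem.Set.add PySem.Set.empty 0))
    0 0 (PySem.Set.ofList [0])
    (by omega) (by simp)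
    (by intro x; rw [hmemo0]; rfl)
    (by decide)
    (by
      intro j hj
      rw [show ((List.replicate (cars.length+1) (PySem.Set.empty : PySem.Set Int)).set 0
          (PySem.Set.add PySem.Set.empty 0)).getD j []
          = (List.replicate (cars.length+1) (PySem.Set.empty : PySem.Set Int)).getD j [] by
        simp [List.getD_eq_getElem?_getD, List.getElem?_set_ne (by omega : ¬ (0:Nat) = j)]]
      by_cases hjl : j < cars.length + 1 <;>
        simp [List.getD_eq_getElem?_getD, hjl, PySem.Set.empty])
    (by simp) (by simp)
  simpa using this

-- ===== the common specification: maximal depth of a reachable placement state =====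

-- FR i l: the first i cars can be placed (respecting both lane capacities at
-- every step) so that the left lane carries exactly l.
def FR (L : Int) (cars : List Int) : Nat → Int → Prop
  | 0, l => l = 0
  | i+1, l => ∃ l₀, FR L cars i l₀ ∧ i < cars.length ∧
      ((l₀ + cars.getD i 0 ≤ L ∧ l = l₀ + cars.getD i 0) ∨
       ((cars.take i).sum + cars.getD i 0 - l₀ ≤ L ∧ l = l₀))

def GoodR (L : Int) (cars : List Int) (r : Int) : Prop :=
  (∃ (k : Nat) (l : Int), FR L cars k l ∧ r = (k : Int)) ∧
  (∀ (k : Nat) (l : Int), FR L cars k l → (k : Int) ≤ r)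

theorem goodR_unique (L : Int) (cars : List Int) (r r' : Int)
    (h : GoodR L cars r) (h' : GoodR L cars r') : r = r' := by
  obtain ⟨⟨k, l, hk, rfl⟩, hub⟩ := h
  obtain ⟨⟨k', l', hk', rfl⟩, hub'⟩ := h'
  exact le_antisymm (hub' k l hk) (hub k' l' hk')

theorem fr_le (L : Int) (cars : List Int) (k : Nat) (l : Int) (h : FR L cars k l) :
    k ≤ cars.length := by
  cases k with
  | zero => omega
  | succ m => obtain ⟨_, _, hm, _⟩ := h; omega

theorem fr_chain (L : Int) (cars : List Int) :
    ∀ (k : Nat) (l : Int), FR L cars k l → ∀ j, j ≤ k → ∃ l', FR L cars j l' := by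
  intro k
  induction k with
  | zero =>
    intro l h j hj
    have hj0 : j = 0 := by omega
    subst hj0
    exact ⟨l, h⟩
  | succ m ih =>
    intro l h j hj
    by_cases hje : j = m + 1
    · exact ⟨l, hje ▸ h⟩
    · obtain ⟨l₀, hl₀, _, _⟩ := h
      exact ih l₀ hl₀ j (by omega)

-- ===== A satisfies the specification =====

theorem altLoop_good (L : Int) (cars : List Int) :
    ∀ (rest : List Int) (i : Nat) (total : Int) (loads : PySem.Set Int),
      cars.drop i = rest → total = (cars.take i).sum →
      (∀ x, x ∈ loads ↔ FR L cars i x) → loads ≠ [] →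
      GoodR L cars (ferryAltLoop L i total loads rest) := by
  intro rest
  induction rest with
  | nil =>
    intro i total loads hdrop htot hmem hne
    have hlen : cars.length ≤ i := by
      have := congrArg List.length hdrop
      simp [List.length_drop] at this
      omega
    obtain ⟨x, hx⟩ := List.exists_mem_of_ne_nil loads hne
    refine ⟨⟨i, x, (hmem x).mp hx, rfl⟩, ?_⟩
    intro k l hk
    have := fr_le L cars k l hk
    simp only [ferryAltLoop]
    omega
  | cons c rest ih =>
    intro i total loads hdrop htot hmem hne
    have hget : cars[i]? = some c := by
      have h0 : (cars.drop i)[0]? = some c := by rw [hdrop]; rfl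
      rw [List.getElem?_drop] at h0
      simpa using h0
    have hilt : i < cars.length := by
      rcases List.getElem?_eq_some_iff.mp hget with ⟨h, _⟩
      exact h
    have hcd : cars.getD i 0 = c := by
      simp [List.getD_eq_getElem?_getD, hget]
    have hdrop1 : cars.drop (i+1) = rest := by
      have h1 : (cars.drop i).drop 1 = rest := by rw [hdrop]; simp
      rw [List.drop_drop] at h1
      simpa [Nat.add_comm 1 i] using h1
    simp only [ferryAltLoop]
    set loads' := PySem.Set.union
      (PySem.Set.ofList ((loads.filter (fun l => decide (l + c ≤ L))).map (fun l => l + c)))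
      (PySem.Set.ofList (loads.filter (fun l => decide (total + c - l ≤ L)))) with hl'
    have hmem' : ∀ x, x ∈ loads' ↔ FR L cars (i+1) x := by
      intro x
      rw [hl', ferry_alt_mem]
      show _ ↔ FR L cars (i+1) x
      simp only [FR]
      constructor
      · rintro ⟨l, hl, hcase⟩
        exact ⟨l, (hmem l).mp hl, hilt, by
          rcases hcase with ⟨h1, h2⟩ | ⟨h1, h2⟩
          · exact Or.inl ⟨by rw [hcd]; exact h1, by rw [hcd]; exact h2⟩
          · exact Or.inr ⟨by rw [hcd, ← htot]; omega, h2⟩⟩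
      · rintro ⟨l, hl, _, hcase⟩
        refine ⟨l, (hmem l).mpr hl, ?_⟩
        rcases hcase with ⟨h1, h2⟩ | ⟨h1, h2⟩
        · exact Or.inl ⟨by rw [hcd] at h1; exact h1, by rw [hcd] at h2; exact h2⟩
        · exact Or.inr ⟨by rw [hcd] at h1; rw [htot]; omega, h2⟩
    by_cases hE : loads'.isEmpty
    · rw [if_pos hE]
      have hnil : loads' = [] := List.isEmpty_iff.mp hE
      obtain ⟨x, hx⟩ := List.exists_mem_of_ne_nil loads hne
      refine ⟨⟨i, x, (hmem x).mp hx, rfl⟩, ?_⟩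
      intro k l hk
      by_contra hlt
      have hki : i + 1 ≤ k := by omega
      obtain ⟨l', hl'⟩ := fr_chain L cars k l hk (i+1) hki
      have : l' ∈ loads' := (hmem' l').mpr hl'
      rw [hnil] at this
      exact (List.not_mem_nil (a := l')).elim this
    · rw [if_neg hE]
      have hne' : loads' ≠ [] := by
        intro hnil; rw [hnil] at hE; simp at hE
      have htake : total + c = (cars.take (i+1)).sum := by
        rw [htot, List.take_add_one, List.sum_append, List.getElem?_eq_getElem hilt]
        simp [← hcd, List.getD_eq_getElem?_getD, List.getElem?_eq_getElem hilt]
      exact ih (i+1) (total + c) loads' hdrop1 htake hmem' hne'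

theorem a_good (L : Int) (cars : List Int) : GoodR L cars (ferry_cars L cars) := by
  rw [ferry_eq_altLoop]
  refine altLoop_good L cars cars 0 0 (PySem.Set.ofList [0]) (by simp) (by simp) ?_ (by decide)
  intro x
  simp only [FR]
  constructor
  · intro h; simpa using ((PySem.Set.mem_ofList _ _).mp h)
  · intro h; exact (PySem.Set.mem_ofList _ _).mpr (by simpa using h)

-- ===== B satisfies the specification =====

def subSums : List Int → List Int
  | [] => [0]
  | c :: r => subSums r ++ (subSums r).map (· + c)

theorem mem_subSums_append (c : Int) :
    ∀ (xs : List Int) (s : Int), s ∈ subSums xs →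
      s ∈ subSums (xs ++ [c]) ∧ s + c ∈ subSums (xs ++ [c]) := by
  intro xs
  induction xs with
  | nil =>
    intro s hs
    simp only [subSums] at hs
    simp only [List.nil_append, subSums]
    rcases List.mem_singleton.mp hs with rfl
    constructor <;> simp
  | cons a r ih =>
    intro s hs
    simp only [subSums, List.mem_append, List.mem_map] at hs
    rcases hs with hs | ⟨s₀, hs₀, rfl⟩
    · obtain ⟨h1, h2⟩ := ih s hs
      constructor <;>
        · simp only [List.cons_append, subSums, List.mem_append, List.mem_map]
          exact Or.inl (by assumption)
    · obtain ⟨h1, h2⟩ := ih s₀ hs₀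
      constructor
      · simp only [List.cons_append, subSums, List.mem_append, List.mem_map]
        exact Or.inr ⟨s₀, h1, rfl⟩
      · simp only [List.cons_append, subSums, List.mem_append, List.mem_map]
        exact Or.inr ⟨s₀ + c, h2, by ring⟩

theorem length_subSums : ∀ (xs : List Int), (subSums xs).length = 2 ^ xs.length := by
  intro xs
  induction xs with
  | nil => simp [subSums]
  | cons a r ih => simp [subSums, ih]; ring

def ferryAllStates (cars : List Int) : List (Nat × Int) :=
  (List.range (cars.length + 1)).flatMap (fun i => (subSums (cars.take i)).map (fun s => (i, s)))

theorem fr_mem_subSums (L : Int) (cars : List Int) :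
    ∀ (i : Nat) (l : Int), FR L cars i l → l ∈ subSums (cars.take i) := by
  intro i
  induction i with
  | zero => intro l h; simp only [FR] at h; simp [subSums, h]
  | succ m ih =>
    intro l h
    obtain ⟨l₀, hl₀, hm, hcase⟩ := h
    have hbase := ih l₀ hl₀
    have htake : cars.take (m+1) = cars.take m ++ [cars.getD m 0] := by
      rw [List.take_add_one, List.getElem?_eq_getElem hm]
      simp [List.getD_eq_getElem?_getD, List.getElem?_eq_getElem hm]
    obtain ⟨h1, h2⟩ := mem_subSums_append (cars.getD m 0) (cars.take m) l₀ hbase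
    rw [htake]
    rcases hcase with ⟨_, rfl⟩ | ⟨_, rfl⟩
    · exact h2
    · exact h1

theorem fr_mem_allStates (L : Int) (cars : List Int) (i : Nat) (l : Int)
    (h : FR L cars i l) : (i, l) ∈ ferryAllStates cars := by
  apply List.mem_flatMap.mpr
  refine ⟨i, List.mem_range.mpr (by have := fr_le L cars i l h; omega), ?_⟩
  exact List.mem_map.mpr ⟨l, fr_mem_subSums L cars i l h, rfl⟩

theorem range_two_pow_sum : ∀ (n : Nat),
    (((List.range (n+1)).map (fun i => 2 ^ i)).sum) + 1 = 2 ^ (n+1) := by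
  intro n
  induction n with
  | zero => simp
  | succ m ih =>
    rw [List.range_succ, List.map_append, List.sum_append]
    simp only [List.map_cons, List.map_nil, List.sum_cons, List.sum_nil]
    have : (2 : Nat) ^ (m + 1 + 1) = 2 ^ (m+1) + 2 ^ (m+1) := by ring
    omega

theorem length_ferryAllStates (cars : List Int) :
    (ferryAllStates cars).length + 1 = 2 ^ (cars.length + 1) := by
  unfold ferryAllStates
  rw [List.length_flatMap]
  have : ((List.range (cars.length + 1)).map
      (fun i => ((subSums (cars.take i)).map (fun s => (i, s))).length)).sum
      = ((List.range (cars.length + 1)).map (fun i => 2 ^ i)).sum := by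
    apply congrArg
    apply List.map_congr_left
    intro i hi
    rw [List.length_map, length_subSums, List.length_take]
    congr 1
    have := List.mem_range.mp hi
    omega
  rw [this]
  exact range_two_pow_sum cars.length

theorem nodup_subset_length {α : Type} [DecidableEq α] (xs ys : List α)
    (hnd : xs.Nodup) (hsub : xs ⊆ ys) : xs.length ≤ ys.length := by
  have h1 : xs.toFinset.card = xs.length := List.toFinset_card_of_nodup hnd
  have h2 : xs.toFinset ⊆ ys.toFinset := by
    intro a ha
    exact List.mem_toFinset.mpr (hsub (List.mem_toFinset.mp ha))
  calc xs.length = xs.toFinset.card := h1.symm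
    _ ≤ ys.toFinset.card := Finset.card_le_card h2
    _ ≤ ys.length := ys.toFinset_card_le

theorem set_add_not_mem {α : Type} [BEq α] [LawfulBEq α] (s : PySem.Set α) (x : α)
    (h : x ∉ s) : PySem.Set.add s x = s ++ [x] := by
  unfold PySem.Set.add
  rw [if_neg (by
    intro hc
    exact h ((PySem.Set.contains_iff _ _).mp hc))]


theorem take_sum_succ (cars : List Int) (i : Nat) (h : i < cars.length) :
    (cars.take (i+1)).sum = (cars.take i).sum + cars.getD i 0 := by
  rw [List.take_add_one, List.sum_append, List.getElem?_eq_getElem h]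
  simp [List.getD_eq_getElem?_getD, List.getElem?_eq_getElem h]

-- the terminal configuration: the stack is empty, visited is closed under the
-- two transitions, and every visited depth is ≤ ans
theorem dfs_terminal (L : Int) (cars : List Int) (visited : PySem.Set (Nat × Int)) (ans : Int)
    (hexp : ∀ p ∈ visited, ((p.1 : Int) ≤ ans ∧ (p.1 < cars.length →
        (p.2 + cars.getD p.1 0 ≤ L → (p.1 + 1, p.2 + cars.getD p.1 0) ∈ visited) ∧
        ((cars.take p.1).sum + cars.getD p.1 0 - p.2 ≤ L → (p.1 + 1, p.2) ∈ visited))))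
    (hans : 0 ≤ ans ∧ ∃ l, FR L cars ans.toNat l)
    (hz : ((0 : Nat), (0 : Int)) ∈ visited) :
    GoodR L cars ans := by
  have hcov : ∀ (k : Nat) (l : Int), FR L cars k l → (k, l) ∈ visited := by
    intro k
    induction k with
    | zero => intro l h; simp only [FR] at h; subst h; exact hz
    | succ m ihm =>
      intro l h
      obtain ⟨l₀, hl₀, hm, hcase⟩ := h
      obtain ⟨_, hcl⟩ := hexp (m, l₀) (ihm l₀ hl₀)
      obtain ⟨hL1, hL2⟩ := hcl hm
      rcases hcase with ⟨h1, rfl⟩ | ⟨h1, rfl⟩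
      · exact hL1 h1
      · exact hL2 h1
  refine ⟨⟨ans.toNat, hans.2.choose, hans.2.choose_spec, (Int.toNat_of_nonneg hans.1).symm⟩, ?_⟩
  intro k l hk
  exact (hexp (k, l) (hcov k l hk)).1

-- one expansion step: the invariants are re-established for any state
-- (newstack, newvis) that extends (stack, visited) by the admissible children
theorem dfs_step (L : Int) (cars : List Int) (fuel : Nat)
    (stack : List (Nat × Int × Int)) (visited : PySem.Set (Nat × Int))
    (ans ans' : Int) (i : Nat) (l t : Int)
    (newstack : List (Nat × Int × Int)) (newvis : PySem.Set (Nat × Int))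
    (ih : ∀ (stack : List (Nat × Int × Int)) (visited : PySem.Set (Nat × Int)) (ans : Int),
      stack.length + 2 * ((ferryAllStates cars).length - visited.length) ≤ fuel →
      visited.Nodup →
      (∀ p ∈ visited, FR L cars p.1 p.2) →
      (∀ s ∈ stack, (s.1, s.2.1) ∈ visited ∧ s.2.2 = (cars.take s.1).sum) →
      (∀ p ∈ visited, ((p.1, p.2, (cars.take p.1).sum) ∈ stack) ∨
        ((p.1 : Int) ≤ ans ∧ (p.1 < cars.length →
          (p.2 + cars.getD p.1 0 ≤ L → (p.1 + 1, p.2 + cars.getD p.1 0) ∈ visited) ∧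
          ((cars.take p.1).sum + cars.getD p.1 0 - p.2 ≤ L → (p.1 + 1, p.2) ∈ visited)))) →
      (0 ≤ ans ∧ ∃ l, FR L cars ans.toNat l) →
      (((0 : Nat), (0 : Int)) ∈ visited) →
      GoodR L cars (ferryDfs L cars cars.length fuel stack visited ans))
    (hμ : (stack.length + 1) + 2 * ((ferryAllStates cars).length - visited.length) ≤ fuel + 1)
    (hexp : ∀ p ∈ visited, ((p.1, p.2, (cars.take p.1).sum) ∈ (i, l, t) :: stack) ∨
        ((p.1 : Int) ≤ ans ∧ (p.1 < cars.length →
          (p.2 + cars.getD p.1 0 ≤ L → (p.1 + 1, p.2 + cars.getD p.1 0) ∈ visited) ∧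
          ((cars.take p.1).sum + cars.getD p.1 0 - p.2 ≤ L → (p.1 + 1, p.2) ∈ visited))))
    (hans' : 0 ≤ ans' ∧ ∃ l', FR L cars ans'.toNat l')
    (hz : ((0 : Nat), (0 : Int)) ∈ visited)
    (hansmono : ans ≤ ans' ∧ (i : Int) ≤ ans')
    (hilt : i < cars.length) (ht : t = (cars.take i).sum)
    (A1 : newvis.Nodup)
    (A2 : ∀ p ∈ newvis, FR L cars p.1 p.2)
    (A3 : ∀ s ∈ newstack, (s.1, s.2.1) ∈ newvis ∧ s.2.2 = (cars.take s.1).sum)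
    (A4 : ∀ p ∈ visited, p ∈ newvis)
    (A5 : ∀ s ∈ stack, s ∈ newstack)
    (A6 : l + cars.getD i 0 ≤ L → (i + 1, l + cars.getD i 0) ∈ newvis)
    (A7 : t + cars.getD i 0 - l ≤ L → (i + 1, l) ∈ newvis)
    (A8 : ∀ p ∈ newvis, p ∈ visited ∨ (p.1, p.2, (cars.take p.1).sum) ∈ newstack)
    (A9 : ∃ k, newstack.length = stack.length + k ∧ newvis.length = visited.length + k) :
    GoodR L cars (ferryDfs L cars cars.length fuel newstack newvis ans') := by
  have hsub : newvis ⊆ ferryAllStates cars := by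
    intro p hp
    exact fr_mem_allStates L cars p.1 p.2 (A2 p hp)
  have hbound : newvis.length ≤ (ferryAllStates cars).length :=
    nodup_subset_length newvis (ferryAllStates cars) A1 hsub
  obtain ⟨k, hk1, hk2⟩ := A9
  apply ih newstack newvis ans'
  · omega
  · exact A1
  · exact A2
  · exact A3
  · intro p hp
    rcases A8 p hp with hold | hnewstk
    · rcases hexp p hold with hmem | ⟨hle, hcl⟩
      · rcases List.mem_cons.mp hmem with heq | htl
        · -- the popped element (i, l, t): now fully expanded
          have hp1 : p.1 = i := congrArg Prod.fst heq
          have hp2 : p.2 = l := by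
            have := congrArg Prod.snd heq
            exact congrArg Prod.fst this
          refine Or.inr ⟨by rw [hp1]; exact hansmono.2, ?_⟩
          intro _
          rw [hp1, hp2]
          exact ⟨fun h => A6 h, fun h => A7 (by rw [ht]; exact h)⟩
        · exact Or.inl (A5 _ htl)
      · exact Or.inr ⟨le_trans hle hansmono.1,
          fun hlt => ⟨fun h => A4 _ ((hcl hlt).1 h), fun h => A4 _ ((hcl hlt).2 h)⟩⟩
    · exact Or.inl hnewstk
  · exact hans'
  · exact A4 _ hz

theorem dfs_good (L : Int) (cars : List Int) :
    ∀ (fuel : Nat) (stack : List (Nat × Int × Int)) (visited : PySem.Set (Nat × Int)) (ans : Int),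
      stack.length + 2 * ((ferryAllStates cars).length - visited.length) ≤ fuel →
      visited.Nodup →
      (∀ p ∈ visited, FR L cars p.1 p.2) →
      (∀ s ∈ stack, (s.1, s.2.1) ∈ visited ∧ s.2.2 = (cars.take s.1).sum) →
      (∀ p ∈ visited, ((p.1, p.2, (cars.take p.1).sum) ∈ stack) ∨
        ((p.1 : Int) ≤ ans ∧ (p.1 < cars.length →
          (p.2 + cars.getD p.1 0 ≤ L → (p.1 + 1, p.2 + cars.getD p.1 0) ∈ visited) ∧
          ((cars.take p.1).sum + cars.getD p.1 0 - p.2 ≤ L → (p.1 + 1, p.2) ∈ visited)))) →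
      (0 ≤ ans ∧ ∃ l, FR L cars ans.toNat l) →
      (((0 : Nat), (0 : Int)) ∈ visited) →
      GoodR L cars (ferryDfs L cars cars.length fuel stack visited ans) := by
  intro fuel
  induction fuel with
  | zero =>
    intro stack visited ans hμ hnd hfr hstk hexp hans hz
    cases stack with
    | cons s stack => simp only [List.length_cons] at hμ; omega
    | nil =>
      simp only [ferryDfs]
      refine dfs_terminal L cars visited ans ?_ hans hz
      intro p hp
      rcases hexp p hp with habs | h
      · exact absurd habs List.not_mem_nil
      · exact h
  | succ fuel ih =>
    intro stack visited ans hμ hnd hfr hstk hexp hans hz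
    cases stack with
    | nil =>
      simp only [ferryDfs]
      refine dfs_terminal L cars visited ans ?_ hans hz
      intro p hp
      rcases hexp p hp with habs | h
      · exact absurd habs List.not_mem_nil
      · exact h
    | cons top stack =>
      obtain ⟨i, l, t⟩ := top
      have hstk0 := hstk (i, l, t) List.mem_cons_self
      have hivis : (i, l) ∈ visited := hstk0.1
      have ht : t = (cars.take i).sum := hstk0.2
      have hfri : FR L cars i l := hfr (i, l) hivis
      have hin : i ≤ cars.length := fr_le L cars i l hfri
      simp only [ferryDfs]
      set ans' := if (i : Int) > ans then (i : Int) else ans with hans'def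
      have hansmono : ans ≤ ans' ∧ (i : Int) ≤ ans' := by
        rw [hans'def]; split_ifs <;> omega
      have hans'inv : 0 ≤ ans' ∧ ∃ l', FR L cars ans'.toNat l' := by
        rw [hans'def]
        split_ifs with hgt
        · exact ⟨by omega, ⟨l, by simpa using hfri⟩⟩
        · exact hans
      by_cases hieq : i = cars.length
      · rw [if_pos hieq]
        apply ih stack visited ans'
        · simp only [List.length_cons] at hμ; omega
        · exact hnd
        · exact hfr
        · intro s hs; exact hstk s (List.mem_cons_of_mem _ hs)
        · intro p hp
          rcases hexp p hp with hmem | ⟨hle, hcl⟩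
          · rcases List.mem_cons.mp hmem with heq | htl
            · have hp1 : p.1 = i := congrArg Prod.fst heq
              refine Or.inr ⟨by rw [hp1]; exact hansmono.2, ?_⟩
              intro hlt
              rw [hp1, hieq] at hlt
              omega
            · exact Or.inl htl
          · exact Or.inr ⟨le_trans hle hansmono.1, hcl⟩
        · exact hans'inv
        · exact hz
      · rw [if_neg hieq]
        have hilt : i < cars.length := by omega
        have hμ' : (stack.length + 1) + 2 * ((ferryAllStates cars).length - visited.length)
            ≤ fuel + 1 := by simpa using hμ
        have hexp' := hexp
        have hts : t + cars.getD i 0 = (cars.take (i+1)).sum := by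
          rw [take_sum_succ cars i hilt, ht]
        -- FR for the two children
        have hfr₁ : l + cars.getD i 0 ≤ L → FR L cars (i+1) (l + cars.getD i 0) := by
          intro h; exact ⟨l, hfri, hilt, Or.inl ⟨h, rfl⟩⟩
        have hfr₂ : t + cars.getD i 0 - l ≤ L → FR L cars (i+1) l := by
          intro h; exact ⟨l, hfri, hilt, Or.inr ⟨by rw [← ht]; omega, rfl⟩⟩
        by_cases hc1 : l + cars.getD i 0 ≤ L ∧ (i+1, l + cars.getD i 0) ∉ visited
        · rw [if_pos hc1]
          have hadd₁ : PySem.Set.add visited (i+1, l + cars.getD i 0)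
              = visited ++ [(i+1, l + cars.getD i 0)] := set_add_not_mem _ _ hc1.2
          have hnd₁ : (PySem.Set.add visited (i+1, l + cars.getD i 0)).Nodup :=
            PySem.Set.nodup_add _ _ hnd
          have hmem₁ : ∀ p, p ∈ PySem.Set.add visited (i+1, l + cars.getD i 0) ↔
              p ∈ visited ∨ p = (i+1, l + cars.getD i 0) := fun p => PySem.Set.mem_add _ _ _
          by_cases hc2 : t + cars.getD i 0 - l ≤ L ∧
              (i+1, l) ∉ PySem.Set.add visited (i+1, l + cars.getD i 0)
          · rw [if_pos hc2]
            have hadd₂ : PySem.Set.add (PySem.Set.add visited (i+1, l + cars.getD i 0)) (i+1, l)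
                = PySem.Set.add visited (i+1, l + cars.getD i 0) ++ [(i+1, l)] :=
              set_add_not_mem _ _ hc2.2
            refine dfs_step L cars fuel stack visited ans ans' i l t _ _ ih hμ' hexp'
              hans'inv hz hansmono hilt ht (PySem.Set.nodup_add _ _ hnd₁) ?_ ?_ ?_ ?_ ?_ ?_ ?_ ?_
            · intro p hp
              rcases (PySem.Set.mem_add _ _ _).mp hp with hp' | rfl
              · rcases (hmem₁ p).mp hp' with hpv | rfl
                · exact hfr p hpv
                · exact hfr₁ hc1.1
              · exact hfr₂ hc2.1
            · intro s hs
              rcases List.mem_cons.mp hs with rfl | hs'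
              · exact ⟨(PySem.Set.mem_add _ _ _).mpr (Or.inr rfl), hts⟩
              rcases List.mem_cons.mp hs' with rfl | hs''
              · exact ⟨(PySem.Set.mem_add _ _ _).mpr (Or.inl ((PySem.Set.mem_add _ _ _).mpr (Or.inr rfl))),
                  hts⟩
              · obtain ⟨h1, h2⟩ := hstk s (List.mem_cons_of_mem _ hs'')
                exact ⟨(PySem.Set.mem_add _ _ _).mpr (Or.inl ((PySem.Set.mem_add _ _ _).mpr (Or.inl h1))), h2⟩
            · intro p hp
              exact (PySem.Set.mem_add _ _ _).mpr (Or.inl ((PySem.Set.mem_add _ _ _).mpr (Or.inl hp)))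
            · intro s hs
              exact List.mem_cons_of_mem _ (List.mem_cons_of_mem _ hs)
            · intro _
              exact (PySem.Set.mem_add _ _ _).mpr (Or.inl ((PySem.Set.mem_add _ _ _).mpr (Or.inr rfl)))
            · intro _
              exact (PySem.Set.mem_add _ _ _).mpr (Or.inr rfl)
            · intro p hp
              rcases (PySem.Set.mem_add _ _ _).mp hp with hp' | rfl
              · rcases (hmem₁ p).mp hp' with hpv | rfl
                · exact Or.inl hpv
                · refine Or.inr ?_
                  have : (cars.take (i+1)).sum = t + cars.getD i 0 := hts.symm
                  simp only [this]
                  exact List.mem_cons_of_mem _ List.mem_cons_self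
              · refine Or.inr ?_
                have : (cars.take (i+1)).sum = t + cars.getD i 0 := hts.symm
                simp only [this]
                exact List.mem_cons_self
            · refine ⟨2, by simp, ?_⟩
              rw [hadd₂, hadd₁]
              simp
          · rw [if_neg hc2]
            refine dfs_step L cars fuel stack visited ans ans' i l t _ _ ih hμ' hexp'
              hans'inv hz hansmono hilt ht hnd₁ ?_ ?_ ?_ ?_ ?_ ?_ ?_ ?_
            · intro p hp
              rcases (hmem₁ p).mp hp with hpv | rfl
              · exact hfr p hpv
              · exact hfr₁ hc1.1
            · intro s hs
              rcases List.mem_cons.mp hs with rfl | hs'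
              · exact ⟨(PySem.Set.mem_add _ _ _).mpr (Or.inr rfl), hts⟩
              · obtain ⟨h1, h2⟩ := hstk s (List.mem_cons_of_mem _ hs')
                exact ⟨(PySem.Set.mem_add _ _ _).mpr (Or.inl h1), h2⟩
            · intro p hp
              exact (PySem.Set.mem_add _ _ _).mpr (Or.inl hp)
            · intro s hs
              exact List.mem_cons_of_mem _ hs
            · intro _
              exact (PySem.Set.mem_add _ _ _).mpr (Or.inr rfl)
            · intro hfit
              rcases not_and_or.mp hc2 with h | h
              · exact absurd hfit h
              · exact not_not.mp h
            · intro p hp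
              rcases (hmem₁ p).mp hp with hpv | rfl
              · exact Or.inl hpv
              · refine Or.inr ?_
                have : (cars.take (i+1)).sum = t + cars.getD i 0 := hts.symm
                simp only [this]
                exact List.mem_cons_self
            · refine ⟨1, by simp, ?_⟩
              rw [hadd₁]
              simp
        · rw [if_neg hc1]
          by_cases hc2 : t + cars.getD i 0 - l ≤ L ∧ (i+1, l) ∉ visited
          · rw [if_pos hc2]
            have hadd₂ : PySem.Set.add visited (i+1, l) = visited ++ [(i+1, l)] :=
              set_add_not_mem _ _ hc2.2
            refine dfs_step L cars fuel stack visited ans ans' i l t _ _ ih hμ' hexp'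
              hans'inv hz hansmono hilt ht (PySem.Set.nodup_add _ _ hnd) ?_ ?_ ?_ ?_ ?_ ?_ ?_ ?_
            · intro p hp
              rcases (PySem.Set.mem_add _ _ _).mp hp with hpv | rfl
              · exact hfr p hpv
              · exact hfr₂ hc2.1
            · intro s hs
              rcases List.mem_cons.mp hs with rfl | hs'
              · exact ⟨(PySem.Set.mem_add _ _ _).mpr (Or.inr rfl), hts⟩
              · obtain ⟨h1, h2⟩ := hstk s (List.mem_cons_of_mem _ hs')
                exact ⟨(PySem.Set.mem_add _ _ _).mpr (Or.inl h1), h2⟩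
            · intro p hp
              exact (PySem.Set.mem_add _ _ _).mpr (Or.inl hp)
            · intro s hs
              exact List.mem_cons_of_mem _ hs
            · intro hfit
              rcases not_and_or.mp hc1 with h | h
              · exact absurd hfit h
              · exact (PySem.Set.mem_add _ _ _).mpr (Or.inl (not_not.mp h))
            · intro _
              exact (PySem.Set.mem_add _ _ _).mpr (Or.inr rfl)
            · intro p hp
              rcases (PySem.Set.mem_add _ _ _).mp hp with hpv | rfl
              · exact Or.inl hpv
              · refine Or.inr ?_
                have : (cars.take (i+1)).sum = t + cars.getD i 0 := hts.symm
                simp only [this]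
                exact List.mem_cons_self
            · refine ⟨1, by simp, ?_⟩
              rw [hadd₂]
              simp
          · rw [if_neg hc2]
            refine dfs_step L cars fuel stack visited ans ans' i l t _ _ ih hμ' hexp'
              hans'inv hz hansmono hilt ht hnd hfr
              (fun s hs => hstk s (List.mem_cons_of_mem _ hs)) (fun _ hp => hp) (fun _ hs => hs)
              ?_ ?_ (fun p hp => Or.inl hp) ⟨0, by simp, by simp⟩
            · intro hfit
              rcases not_and_or.mp hc1 with h | h
              · exact absurd hfit h
              · exact not_not.mp h
            · intro hfit
              rcases not_and_or.mp hc2 with h | h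
              · exact absurd hfit h
              · exact not_not.mp h

theorem b_good (L : Int) (cars : List Int) : GoodR L cars (ferry_cars_alt L cars) := by
  unfold ferry_cars_alt
  have hA := length_ferryAllStates cars
  apply dfs_good L cars (2 ^ (cars.length + 2)) [(0, 0, 0)]
    (PySem.Set.ofList [((0 : Nat), (0 : Int))]) 0
  · have h1 : (PySem.Set.ofList [((0 : Nat), (0 : Int))]).length = 1 := rfl
    have h2 : (2 : Nat) ^ (cars.length + 2) = 2 * 2 ^ (cars.length + 1) := by ring
    rw [h1, h2]
    simp only [List.length_cons, List.length_nil]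
    generalize (2 : Nat) ^ (cars.length + 1) = P at hA h2 ⊢
    omega
  · exact PySem.Set.nodup_ofList _
  · intro p hp
    have : p = ((0 : Nat), (0 : Int)) := by simpa using ((PySem.Set.mem_ofList _ _).mp hp)
    subst this
    rfl
  · intro s hs
    have : s = ((0 : Nat), (0 : Int), (0 : Int)) := by simpa using hs
    subst this
    exact ⟨(PySem.Set.mem_ofList _ _).mpr (by simp), by simp⟩
  · intro p hp
    have : p = ((0 : Nat), (0 : Int)) := by simpa using ((PySem.Set.mem_ofList _ _).mp hp)
    subst this
    exact Or.inl (by simp)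
  · exact ⟨le_refl 0, ⟨0, rfl⟩⟩
  · exact (PySem.Set.mem_ofList _ _).mpr (by simp)

-- ===== VERDICT (by name: the statement is the Claim_ definition above) =====
theorem ferry_cars_spec : Claim_equal_ferry_cars := by
  intro L cars _
  unfold Spec_ferry_cars
  exact goodR_unique L cars _ _ (a_good L cars) (b_good L cars)
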